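-- pv_equiv track=rewrite | github.com/VladKha/CodeWars | 4 kyu/The fusc function -- Part 2/solve.py | fusc
-- ===== SOURCE A (Python) =====
-- def fusc(n):
--     a, b = 0, 1
--     while n >= 1:
--         if n % 2 == 0:
--             b += a
--         else:
--             a += b
--         n //= 2
--     return a
-- ===== SOURCE B (Python) =====
-- def fusc(n):
--     if n <= 0:
--         return 0
--     if n == 1:
--         return 1
--     if n % 2 == 0:
--         return fusc(n // 2)
--     return fusc(n // 2) + fusc(n // 2 + 1)
-- ===== Notes on version B (the rewrite author's own statement) =====
-- stated objective: alternative
-- what changed: Replaces the iterative LSB-to-MSB bit-scanning loop carrying a pair of accumulators with direct top-down recursion on the classic fusc recurrence: halve the argument when even, add the values at the two neighbouring halvings when odd.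
import Mathlib
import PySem

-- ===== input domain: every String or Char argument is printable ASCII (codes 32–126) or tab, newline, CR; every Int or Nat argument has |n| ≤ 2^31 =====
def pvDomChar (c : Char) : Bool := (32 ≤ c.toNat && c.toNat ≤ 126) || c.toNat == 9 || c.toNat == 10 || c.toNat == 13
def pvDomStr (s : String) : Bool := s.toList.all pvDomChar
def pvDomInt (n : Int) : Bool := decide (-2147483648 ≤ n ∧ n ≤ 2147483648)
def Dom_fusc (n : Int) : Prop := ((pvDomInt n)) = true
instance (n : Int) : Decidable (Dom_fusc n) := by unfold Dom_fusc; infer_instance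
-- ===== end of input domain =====

-- B replaces A's iterative bit-scan with an (a,b) pair by direct recursion on the fusc recurrence (objective: alternative decomposition).

-- ===== PORT A =====
-- the while-loop of A, state (n, a, b)
def fuscLoop (n a b : Int) : Int :=
  if n ≥ 1 then
    if PySem.Int.mod n 2 = 0 then fuscLoop (PySem.Int.floordiv n 2) a (b + a)
    else fuscLoop (PySem.Int.floordiv n 2) (a + b) b
  else a
termination_by n.toNat
decreasing_by
  all_goals
    have := PySem.Int.floordiv_eq_ediv_of_pos (a := n) (b := 2) (by omega)
    omega

def fusc (n : Int) : Int := fuscLoop n 0 1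

-- ===== PORT B =====
def fusc_alt (n : Int) : Int :=
  if n ≤ 0 then 0
  else if n = 1 then 1
  else if PySem.Int.mod n 2 = 0 then fusc_alt (PySem.Int.floordiv n 2)
  else fusc_alt (PySem.Int.floordiv n 2) + fusc_alt (PySem.Int.floordiv n 2 + 1)
termination_by n.toNat
decreasing_by
  all_goals
    have h1 := PySem.Int.floordiv_eq_ediv_of_pos (a := n) (b := 2) (by omega)
    have h2 := PySem.Int.mod_eq_emod_of_pos (a := n) (b := 2) (by omega)
    omega

-- ===== PRECONDITION & SPEC =====
def Spec_fusc (n : Int) (out : Int) : Prop := out = fusc_alt n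
instance (n : Int) (out : Int) : Decidable (Spec_fusc n out) := by unfold Spec_fusc; infer_instance

-- ===== CLAIM (what is proved, stated in full; the proofs are below) =====
def Claim_equal_fusc : Prop := ∀ (n : Int), Dom_fusc n → Spec_fusc n (fusc n)

-- ===== LEMMAS AND PROOFS =====

theorem fusc_alt_nonpos (n : Int) (h : n ≤ 0) : fusc_alt n = 0 := by
  rw [fusc_alt]; simp [h]

theorem fusc_alt_one : fusc_alt 1 = 1 := by
  rw [fusc_alt]; norm_num

-- F(2m) = F(m) for m ≥ 1
theorem fusc_alt_even (m : Int) (hm : 1 ≤ m) : fusc_alt (2 * m) = fusc_alt m := by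
  have hmod : PySem.Int.mod (2 * m) 2 = 0 := by
    rw [PySem.Int.mod_eq_emod_of_pos (by omega)]; omega
  have hdiv : PySem.Int.floordiv (2 * m) 2 = m := by
    rw [PySem.Int.floordiv_eq_ediv_of_pos (by omega)]; omega
  rw [fusc_alt, if_neg (show ¬(2 * m ≤ 0) by omega), if_neg (show ¬(2 * m = 1) by omega),
      hmod, hdiv, if_pos rfl]

-- F(2m+1) = F(m) + F(m+1) for m ≥ 0
theorem fusc_alt_odd (m : Int) (hm : 0 ≤ m) : fusc_alt (2 * m + 1) = fusc_alt m + fusc_alt (m + 1) := by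
  rcases eq_or_lt_of_le hm with h0 | h1
  · rw [← h0]
    norm_num [fusc_alt_one, fusc_alt_nonpos 0 le_rfl]
  · have hmod : PySem.Int.mod (2 * m + 1) 2 = 1 := by
      rw [PySem.Int.mod_eq_emod_of_pos (by omega)]; omega
    have hdiv : PySem.Int.floordiv (2 * m + 1) 2 = m := by
      rw [PySem.Int.floordiv_eq_ediv_of_pos (by omega)]; omega
    rw [fusc_alt, if_neg (show ¬(2 * m + 1 ≤ 0) by omega),
        if_neg (show ¬(2 * m + 1 = 1) by omega), hmod, hdiv, if_neg (by omega)]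

-- loop invariant: for n ≥ 0, fuscLoop n a b = a * F(n+1) + b * F(n)
theorem fuscLoop_eq (n a b : Int) (hn : 0 ≤ n) :
    fuscLoop n a b = a * fusc_alt (n + 1) + b * fusc_alt n := by
  induction n, a, b using fuscLoop.induct with
  | case1 n a b h hmod ih =>
    rw [fuscLoop, if_pos h, if_pos hmod]
    have hm2 : PySem.Int.mod n 2 = n % 2 := PySem.Int.mod_eq_emod_of_pos (by omega)
    have hdiv : PySem.Int.floordiv n 2 = n / 2 := PySem.Int.floordiv_eq_ediv_of_pos (by omega)
    obtain ⟨m, hm⟩ : ∃ m, n = 2 * m := ⟨n / 2, by omega⟩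
    have hm1 : 1 ≤ m := by omega
    rw [ih (by omega), show PySem.Int.floordiv n 2 = m by omega, hm,
        show (2 : Int) * m + 1 = 2 * m + 1 from rfl,
        fusc_alt_even m hm1, fusc_alt_odd m (by omega)]
    ring
  | case2 n a b h hmod ih =>
    rw [fuscLoop, if_pos h, if_neg hmod]
    have hm2 : PySem.Int.mod n 2 = n % 2 := PySem.Int.mod_eq_emod_of_pos (by omega)
    have hdiv : PySem.Int.floordiv n 2 = n / 2 := PySem.Int.floordiv_eq_ediv_of_pos (by omega)
    obtain ⟨m, hm⟩ : ∃ m, n = 2 * m + 1 := ⟨n / 2, by omega⟩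
    have hm0 : 0 ≤ m := by omega
    rw [ih (by omega), show PySem.Int.floordiv n 2 = m by omega, hm, fusc_alt_odd m hm0,
        show (2 : Int) * m + 1 + 1 = 2 * (m + 1) from by ring,
        fusc_alt_even (m + 1) (by omega)]
    ring
  | case3 n a b h =>
    rw [fuscLoop, if_neg h]
    have h0 : n = 0 := by omega
    subst h0
    norm_num [fusc_alt_one, fusc_alt_nonpos 0 le_rfl]

-- ===== VERDICT (by name: the statement is the Claim_ definition above) =====
theorem fusc_spec : Claim_equal_fusc := by
  intro n _
  unfold Spec_fusc fusc
  by_cases hn : 0 ≤ n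
  · rw [fuscLoop_eq n 0 1 hn]; ring
  · rw [fuscLoop, if_neg (by omega), fusc_alt_nonpos n (by omega)]
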